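-- pv_equiv track=rewrite | github.com/saulin18/code-challenges-technical-tests | adventjs-midudev-2024/day14.py | min_moves_to_stables
-- ===== SOURCE A (Python) =====
-- def min_moves_to_stables(reindeer: list[int], stables: list[int]) -> int:
--     taken_stables = set()
--     total_moves = 0
--     i = 0
--     current_tried_stables = []
--     while len(taken_stables) < len(stables):
--         stable_with_minimun_distance = min(
--             (stable for stable in stables if stable not in current_tried_stables),
--             key=lambda stable: abs(stable - reindeer[i]),
--         )
--         if stable_with_minimun_distance not in taken_stables:
--             taken_stables.add(stable_with_minimun_distance)
--             total_moves += abs(stable_with_minimun_distance - reindeer[i])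
--             current_tried_stables.clear()
--             i += 1
--             continue
--         current_tried_stables.append(stable_with_minimun_distance)
--
--     return total_moves
-- ===== SOURCE B (Python) =====
-- def min_moves_to_stables(reindeer, stables):
--     available = list(stables)
--     total = 0
--     for r in reindeer[:len(stables)]:
--         best = available[0]
--         for s in available[1:]:
--             if abs(s - r) < abs(best - r):
--                 best = s
--         total += abs(best - r)
--         available.remove(best)
--     return total
-- ===== Notes on version B (the rewrite author's own statement) =====
-- stated objective: faster
-- what changed: Replaces A's retry loop (re-running min over all stables with a growing 'tried' list until an untaken one appears) by a shrinking 'available' list: one linear argmin scan per reindeer followed by removing the chosen stable, so the set/tried bookkeeping and repeated min passes disappear.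
import Mathlib
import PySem

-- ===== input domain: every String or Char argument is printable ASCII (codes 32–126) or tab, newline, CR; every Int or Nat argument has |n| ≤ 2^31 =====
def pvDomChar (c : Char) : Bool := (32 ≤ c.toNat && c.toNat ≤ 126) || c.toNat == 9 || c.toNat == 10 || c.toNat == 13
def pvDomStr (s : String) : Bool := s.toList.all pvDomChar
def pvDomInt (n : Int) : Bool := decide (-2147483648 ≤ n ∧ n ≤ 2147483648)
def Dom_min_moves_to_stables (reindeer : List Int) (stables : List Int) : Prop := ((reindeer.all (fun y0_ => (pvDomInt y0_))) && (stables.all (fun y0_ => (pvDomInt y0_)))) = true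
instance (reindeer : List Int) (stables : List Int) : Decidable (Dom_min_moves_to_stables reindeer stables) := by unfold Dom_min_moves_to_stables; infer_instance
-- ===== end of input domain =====

-- B replaces A's retry loop over a growing 'tried' list by one argmin scan over a
-- shrinking 'available' list (objective: faster; measured).

-- termination helper for the port of A: appending the just-tried stable strictly
-- shrinks the not-yet-tried list
theorem pvFilterSnocLt (stables tried : List Int) (m : Int)
    (hm : m ∈ stables.filter (fun s => !(tried.contains s))) :
    (stables.filter (fun s => !((tried ++ [m]).contains s))).length <
      (stables.filter (fun s => !(tried.contains s))).length := by
  have h1 : (stables.filter (fun s => !((tried ++ [m]).contains s)))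
      = (stables.filter (fun s => !(tried.contains s))).filter (fun s => !(s == m)) := by
    rw [List.filter_filter]
    apply List.filter_congr
    intro x _
    by_cases hx : x ∈ tried <;> by_cases hx2 : x = m <;>
      simp [hx, hx2]
  rw [h1]
  rw [List.length_filter_lt_length_iff_exists]
  exact ⟨m, hm, by simp⟩

-- ===== PORT A =====
def aLoop (reindeer stables : List Int) (taken : PySem.Set Int) (total : Int)
    (i : Int) (tried : List Int) : Int :=
  if _h : taken.length < stables.length then
    match hm : PySem.List.min? (stables.filter (fun s => !(tried.contains s)))
        (fun s => |s - PySem.List.pyGetD reindeer i 0|) with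
    | none => total  -- Python: min() of an empty sequence raises ValueError (outside Pre_)
    | some m =>
      if PySem.Set.contains taken m then
        aLoop reindeer stables taken total i (tried ++ [m])
      else
        aLoop reindeer stables (PySem.Set.add taken m)
          (total + |m - PySem.List.pyGetD reindeer i 0|) (i + 1) []
  else total
termination_by (stables.length - taken.length, (stables.filter (fun s => !(tried.contains s))).length)
decreasing_by
  · apply Prod.Lex.right
    exact pvFilterSnocLt stables tried m (PySem.List.min?_mem hm)
  · apply Prod.Lex.left
    rename_i hc
    rw [PySem.Set.add_of_not_mem (by simpa using hc)]
    simp only [List.length_append, List.length_cons, List.length_nil]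
    omega

def min_moves_to_stables (reindeer : List Int) (stables : List Int) : Int :=
  aLoop reindeer stables PySem.Set.empty 0 0 []

-- ===== PORT B =====
def bPick (r : Int) (available : List Int) : Int :=
  -- best = available[0]; for s in available[1:]: if abs(s-r) < abs(best-r): best = s
  -- (available is never empty when Python B reads available[0]; 0 is the total-form default)
  (PySem.List.slice available (some 1) none).foldl
    (fun best s => if |s - r| < |best - r| then s else best)
    (PySem.List.pyGetD available 0 0)

def min_moves_to_stables_alt (reindeer : List Int) (stables : List Int) : Int :=
  ((PySem.List.slice reindeer none (some (PySem.List.len stables))).foldl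
    (fun st r =>
      let best := bPick r st.2
      (st.1 + |best - r|, (PySem.List.remove? st.2 best).getD st.2))
    ((0 : Int), stables)).1

-- ===== PRECONDITION & SPEC =====
-- Pre_ is exactly where the Python A returns normally: with a duplicated stable value the
-- while-condition can never be met (A ends in ValueError/IndexError), and with fewer
-- reindeer than stables A hits reindeer[i] out of range (IndexError).
def Pre_min_moves_to_stables (reindeer : List Int) (stables : List Int) : Prop :=
  stables.Nodup ∧ stables.length ≤ reindeer.length
instance (reindeer : List Int) (stables : List Int) : Decidable (Pre_min_moves_to_stables reindeer stables) := by unfold Pre_min_moves_to_stables; infer_instance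

def pvWitness_min_moves_to_stables : List Int × List Int := ([2, 7, -4], [5, 0, -1])


def Spec_min_moves_to_stables (reindeer : List Int) (stables : List Int) (out : Int) : Prop := out = min_moves_to_stables_alt reindeer stables
instance (reindeer : List Int) (stables : List Int) (out : Int) : Decidable (Spec_min_moves_to_stables reindeer stables out) := by unfold Spec_min_moves_to_stables; infer_instance

-- ===== CLAIM (what is proved, stated in full; the proofs are below) =====
def Claim_equal_min_moves_to_stables : Prop := ∀ (reindeer : List Int) (stables : List Int), Dom_min_moves_to_stables reindeer stables → Pre_min_moves_to_stables reindeer stables → Spec_min_moves_to_stables reindeer stables (min_moves_to_stables reindeer stables)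


-- ===== LEMMAS AND PROOFS =====

-- the running-argmin fold of B's inner loop
def gmin (r m : Int) (l : List Int) : Int :=
  l.foldl (fun best s => if |s - r| < |best - r| then s else best) m

theorem gmin_min? (r : Int) (x : Int) (l : List Int) :
    PySem.List.min? (x :: l) (fun s => |s - r|) = some (gmin r x l) := by
  induction l generalizing x with
  | nil => rfl
  | cons s t ih =>
    have hs := ih s
    have hx := ih x
    simp only [PySem.List.min?, List.foldl_cons] at hs hx ⊢
    simp only [gmin, List.foldl_cons] at hs hx ⊢
    by_cases hc : |s - r| < |x - r| <;> simp only [hc, if_pos, if_neg, not_false_iff] <;>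
      first | exact hs | exact hx

theorem gmin_keep (r m : Int) (l : List Int) (h : ∀ y ∈ l, |m - r| ≤ |y - r|) :
    gmin r m l = m := by
  induction l with
  | nil => rfl
  | cons x t ih =>
    have hx : |m - r| ≤ |x - r| := h x (by simp)
    have : ¬ (|x - r| < |m - r|) := not_lt.mpr hx
    simp only [gmin, List.foldl_cons, if_neg this]
    exact ih (fun y hy => h y (by simp [hy]))

theorem gmin_le_seed (r : Int) : ∀ (l : List Int) (m : Int), |gmin r m l - r| ≤ |m - r| := by
  intro l
  induction l with
  | nil => intro m; simp [gmin]
  | cons x t ih =>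
    intro m
    by_cases hc : |x - r| < |m - r|
    · simpa [gmin, hc] using le_trans (ih x) (le_of_lt hc)
    · simpa [gmin, hc] using ih m

theorem gmin_mid (r m : Int) (l2 : List Int) (h2 : ∀ y ∈ l2, |m - r| ≤ |y - r|) :
    ∀ (l1 : List Int) (a : Int), |m - r| < |a - r| → (∀ y ∈ l1, |m - r| < |y - r|) →
    gmin r a (l1 ++ m :: l2) = m := by
  intro l1
  induction l1 with
  | nil =>
    intro a ha _
    simp only [List.nil_append, gmin, List.foldl_cons, if_pos ha]
    exact gmin_keep r m l2 h2
  | cons b t ih =>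
    intro a ha hb
    have hbm : |m - r| < |b - r| := hb b (by simp)
    have ht : ∀ y ∈ t, |m - r| < |y - r| := fun y hy => hb y (by simp [hy])
    have hstep : gmin r a ((b :: t) ++ m :: l2) =
        gmin r (if |b - r| < |a - r| then b else a) (t ++ m :: l2) := by
      simp only [List.cons_append, gmin, List.foldl_cons]
    rw [hstep]
    split_ifs with hc
    · exact ih b hbm ht
    · exact ih a ha ht

theorem min?_suffices (r m : Int) (l1 l2 : List Int)
    (h1 : ∀ y ∈ l1, |m - r| < |y - r|) (h2 : ∀ y ∈ l2, |m - r| ≤ |y - r|) :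
    PySem.List.min? (l1 ++ m :: l2) (fun s => |s - r|) = some m := by
  cases l1 with
  | nil =>
    rw [List.nil_append, gmin_min?]
    exact congrArg some (gmin_keep r m l2 h2)
  | cons a t =>
    rw [List.cons_append, gmin_min?]
    exact congrArg some (gmin_mid r m l2 h2 t a (h1 a (by simp)) (fun y hy => h1 y (by simp [hy])))

theorem gmin_char (r : Int) : ∀ (l : List Int) (m : Int),
    ∃ l1 l2, m :: l = l1 ++ (gmin r m l) :: l2 ∧ (∀ y ∈ l1, |gmin r m l - r| < |y - r|) ∧
      (∀ y ∈ l2, |gmin r m l - r| ≤ |y - r|) := by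
  intro l
  induction l with
  | nil => intro m; exact ⟨[], [], by simp [gmin]⟩
  | cons s t ih =>
    intro m
    by_cases hc : |s - r| < |m - r|
    · have hg : gmin r m (s :: t) = gmin r s t := by simp [gmin, hc]
      obtain ⟨u, v, he, hu, hv⟩ := ih s
      refine ⟨m :: u, v, ?_, ?_, by simpa [hg] using hv⟩
      · rw [hg]; simpa using congrArg (m :: ·) he
      · intro y hy
        rcases List.mem_cons.mp hy with h | h
        · subst h; rw [hg]; exact lt_of_le_of_lt (gmin_le_seed r t s) hc
        · rw [hg]; exact hu y h
    · have hms : |m - r| ≤ |s - r| := not_lt.mp hc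
      have hg : gmin r m (s :: t) = gmin r m t := by simp [gmin, hc]
      obtain ⟨u, v, he, hu, hv⟩ := ih m
      cases u with
      | nil =>
        have hres : gmin r m t = m := by
          have := he; simp only [List.nil_append] at this
          exact (List.cons.injEq _ _ _ _ ▸ this).1.symm
        refine ⟨[], s :: t, by simp [hg, hres], by simp, ?_⟩
        intro y hy
        rcases List.mem_cons.mp hy with h | h
        · subst h; rw [hg, hres]; exact hms
        · rw [hg, hres]
          have hv' : v = t := by
            have := he; simp only [List.nil_append, hres, List.cons.injEq] at this
            exact this.2.symm
          have := hv y (hv' ▸ h)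
          rwa [hres] at this
      | cons a u' =>
        have he' : m = a ∧ t = u' ++ gmin r m t :: v := by
          have := he; simp only [List.cons_append, List.cons.injEq] at this
          exact this
        have ham : |gmin r m t - r| < |m - r| := he'.1 ▸ hu a (by simp)
        refine ⟨m :: s :: u', v, ?_, ?_, by simpa [hg] using hv⟩
        · rw [hg]; simp [List.cons_append, ← he'.2]
        · intro y hy
          rcases List.mem_cons.mp hy with h | h
          · subst h; rw [hg]; exact ham
          rcases List.mem_cons.mp h with h' | h'
          · subst h'; rw [hg]; exact lt_of_lt_of_le ham hms
          · rw [hg]; exact hu y (he'.1 ▸ by simp [h'])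

theorem min?_char (r m : Int) (l : List Int)
    (h : PySem.List.min? l (fun s => |s - r|) = some m) :
    ∃ l1 l2, l = l1 ++ m :: l2 ∧ (∀ y ∈ l1, |m - r| < |y - r|) ∧ (∀ y ∈ l2, |m - r| ≤ |y - r|) := by
  cases l with
  | nil => simp [PySem.List.min?] at h
  | cons x t =>
    rw [gmin_min?] at h
    obtain rfl : gmin r x t = m := Option.some.injEq _ _ ▸ h
    exact gmin_char r t x

theorem pvSubsetLengthLt {l l' : List Int} (hnd : l.Nodup) (hs : l ⊆ l')
    {x : Int} (hx : x ∈ l') (hnx : x ∉ l) : l.length < l'.length := by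
  have h1 : l.toFinset ⊂ l'.toFinset := by
    constructor
    · intro a ha; simp only [List.mem_toFinset] at *; exact hs ha
    · intro hsub
      exact hnx (by simpa using hsub (by simpa using hx))
  calc l.length = l.toFinset.card := (List.toFinset_card_of_nodup hnd).symm
    _ < l'.toFinset.card := Finset.card_lt_card h1
    _ ≤ l'.length := List.toFinset_card_le l'

-- the 'not yet taken' stables, seen through the 'not yet tried' ones
theorem pvFilterTakenTried (stables tried taken : List Int)
    (htr : ∀ y ∈ tried, y ∈ taken) :
    stables.filter (fun s => !(taken.contains s)) =
      (stables.filter (fun s => !(tried.contains s))).filter (fun s => !(taken.contains s)) := by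
  rw [List.filter_filter]
  apply List.filter_congr
  intro x _
  by_cases hx : x ∈ taken
  · simp [hx]
  · have : x ∉ tried := fun h => hx (htr x h)
    simp [hx, this]

-- A's retry sub-loop: with everything tried so far already taken, the loop eventually
-- assigns the first-minimal untaken stable
theorem aLoop_assign (reindeer stables : List Int) (_hnd : stables.Nodup) :
    ∀ (N : Nat) (tried taken : List Int) (total i : Int) (m : Int),
    taken.Nodup → taken ⊆ stables → (∀ y ∈ tried, y ∈ taken) →
    (stables.filter (fun s => !(tried.contains s))).length ≤ N →
    PySem.List.min? (stables.filter (fun s => !(taken.contains s)))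
      (fun s => |s - PySem.List.pyGetD reindeer i 0|) = some m →
    aLoop reindeer stables taken total i tried =
      aLoop reindeer stables (PySem.Set.add taken m)
        (total + |m - PySem.List.pyGetD reindeer i 0|) (i + 1) [] := by
  intro N
  induction N with
  | zero =>
    intro tried taken total i m hnt hts htr hN hm
    exfalso
    have hFt : stables.filter (fun s => !(tried.contains s)) = [] :=
      List.eq_nil_of_length_eq_zero (Nat.le_zero.mp hN)
    have : stables.filter (fun s => !(taken.contains s)) = [] := by
      rw [pvFilterTakenTried stables tried taken htr, hFt]; rfl
    rw [this] at hm
    simp [PySem.List.min?] at hm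
  | succ N ih =>
    intro tried taken total i m hnt hts htr hN hm
    have hmF : m ∈ stables.filter (fun s => !(taken.contains s)) := PySem.List.min?_mem hm
    have hmS : m ∈ stables := List.mem_of_mem_filter hmF
    have hmT : m ∉ taken := by
      have := List.of_mem_filter hmF; simp at this; exact this
    have hguard : List.length taken < stables.length :=
      pvSubsetLengthLt hnt hts hmS hmT
    have hFne : stables.filter (fun s => !(tried.contains s)) ≠ [] := by
      intro hnil
      rw [pvFilterTakenTried stables tried taken htr, hnil] at hmF
      simp at hmF
    conv_lhs => rw [aLoop]
    rw [dif_pos hguard]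
    split
    · rename_i hnone
      exact absurd ((PySem.List.min?_eq_none_iff _ _).mp hnone) hFne
    · rename_i m' hm'
      by_cases htk : PySem.Set.contains taken m' = true
      · rw [if_pos htk]
        refine ih (tried ++ [m']) taken total i m hnt hts ?_ ?_ hm
        · intro y hy
          rcases List.mem_append.mp hy with h | h
          · exact htr y h
          · have : y = m' := by simpa using h
            subst this
            simpa using htk
        · have := pvFilterSnocLt stables tried m' (PySem.List.min?_mem hm')
          omega
      · rw [if_neg htk]
        -- the picked stable is untaken, so it is exactly the first-minimal untaken one
        have hmm : m' = m := by
          obtain ⟨u, v, he, hu, hv⟩ := min?_char _ m' _ hm'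
          have hm'T : m' ∉ taken := by simpa using htk
          have hFsplit : stables.filter (fun s => !(taken.contains s)) =
              u.filter (fun s => !(taken.contains s)) ++ m' :: v.filter (fun s => !(taken.contains s)) := by
            rw [pvFilterTakenTried stables tried taken htr, he, List.filter_append,
              List.filter_cons]
            simp [hm'T]
          have : PySem.List.min? (stables.filter (fun s => !(taken.contains s)))
              (fun s => |s - PySem.List.pyGetD reindeer i 0|) = some m' := by
            rw [hFsplit]
            exact min?_suffices _ m' _ _
              (fun y hy => hu y (List.mem_of_mem_filter hy))
              (fun y hy => hv y (List.mem_of_mem_filter hy))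
          rw [this] at hm
          exact Option.some_inj.mp hm
        rw [hmm]

theorem pvIdxOf? (m : Int) : ∀ (l : List Int), m ∈ l → List.idxOf? m l = some (l.idxOf m) := by
  intro l
  induction l with
  | nil => intro h; simp at h
  | cons x t ih =>
    intro h
    by_cases hx : m = x
    · subst hx; simp [List.idxOf?_cons]
    · have hmt : m ∈ t := by rcases List.mem_cons.mp h with h' | h'; exact absurd h' hx; exact h'
      simp [List.idxOf?_cons, Ne.symm hx, ih hmt, Option.map_some]

theorem pvRemoveGetD (l : List Int) (m : Int) (h : m ∈ l) :
    (PySem.List.remove? l m).getD l = l.erase m := by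
  simp only [PySem.List.remove?, pvIdxOf? m l h, Option.map_some, Option.getD_some]
  exact (List.erase_eq_eraseIdx_of_idxOf rfl).symm

theorem pvFilterSnocEq (stables tried : List Int) (m : Int) :
    stables.filter (fun s => !((tried ++ [m]).contains s)) =
      (stables.filter (fun s => !(tried.contains s))).filter (fun s => !(s == m)) := by
  rw [List.filter_filter]
  apply List.filter_congr
  intro x _
  by_cases hx : x ∈ tried <;> by_cases hx2 : x = m <;> simp [hx, hx2]

theorem pvSubsetLengthLe {l l' : List Int} (hnd : l.Nodup) (hs : l ⊆ l') : l.length ≤ l'.length := by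
  calc l.length = l.toFinset.card := (List.toFinset_card_of_nodup hnd).symm
    _ ≤ l'.toFinset.card := Finset.card_le_card (fun a ha => by
        simp only [List.mem_toFinset] at *; exact hs ha)
    _ ≤ l'.length := List.toFinset_card_le l'

theorem main_loop (reindeer stables : List Int) (hnd : stables.Nodup)
    (hlen : stables.length ≤ reindeer.length) :
    ∀ (N : Nat) (taken : List Int) (total : Int),
    taken.Nodup → taken ⊆ stables →
    (stables.filter (fun s => !(taken.contains s))).length ≤ N →
    aLoop reindeer stables taken total (taken.length : Int) [] =
      ((List.drop taken.length (reindeer.take stables.length)).foldl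
        (fun st r =>
          let best := bPick r st.2
          (st.1 + |best - r|, (PySem.List.remove? st.2 best).getD st.2))
        (total, stables.filter (fun s => !(taken.contains s)))).1 := by
  have done : ∀ (taken : List Int) (total : Int), taken.Nodup → taken ⊆ stables →
      stables.filter (fun s => !(taken.contains s)) = [] →
      aLoop reindeer stables taken total (taken.length : Int) [] =
        ((List.drop taken.length (reindeer.take stables.length)).foldl
          (fun st r =>
            let best := bPick r st.2
            (st.1 + |best - r|, (PySem.List.remove? st.2 best).getD st.2))
          (total, stables.filter (fun s => !(taken.contains s)))).1 := by
    intro taken total hnt hts hF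
    have hsub : stables ⊆ taken := by
      intro s hs
      by_contra hns
      have : s ∈ stables.filter (fun s => !(taken.contains s)) := by
        simp [List.mem_filter, hs, hns]
      rw [hF] at this
      simp at this
    have heq : taken.length = stables.length :=
      le_antisymm (pvSubsetLengthLe hnt hts) (pvSubsetLengthLe hnd hsub)
    have hdrop : List.drop taken.length (reindeer.take stables.length) = [] := by
      apply List.drop_eq_nil_of_le
      rw [List.length_take]
      omega
    rw [hdrop, aLoop, dif_neg (by omega)]
    rfl
  intro N
  induction N with
  | zero =>
    intro taken total hnt hts hN
    exact done taken total hnt hts (List.eq_nil_of_length_eq_zero (Nat.le_zero.mp hN))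
  | succ N ih =>
    intro taken total hnt hts hN
    rcases hA : stables.filter (fun s => !(taken.contains s)) with _ | ⟨x, t⟩
    · have hd := done taken total hnt hts hA
      rw [hA] at hd
      exact hd
    · -- one round: A assigns the first-minimal untaken stable, B scans and removes it
      set ri := PySem.List.pyGetD reindeer (taken.length : Int) 0 with hri
      obtain ⟨m, hm⟩ : ∃ m, PySem.List.min? (stables.filter (fun s => !(taken.contains s)))
          (fun s => |s - ri|) = some m := by
        rw [hA, gmin_min?]
        exact ⟨_, rfl⟩
      have hmF : m ∈ stables.filter (fun s => !(taken.contains s)) := PySem.List.min?_mem hm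
      have hmS : m ∈ stables := List.mem_of_mem_filter hmF
      have hmT : m ∉ taken := by have := List.of_mem_filter hmF; simp at this; exact this
      have hguard : taken.length < stables.length := pvSubsetLengthLt hnt hts hmS hmT
      have hndF : (stables.filter (fun s => !(taken.contains s))).Nodup := hnd.filter _
      -- A side: collapse the retry loop into one assignment
      rw [aLoop_assign reindeer stables hnd stables.length [] taken total _ m hnt hts
        (by simp) (by simpa using List.length_filter_le _ stables) hm]
      rw [← hri]
      have hadd : PySem.Set.add taken m = taken ++ [m] := PySem.Set.add_of_not_mem hmT
      -- new untaken list = old one with m erased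
      have hF' : stables.filter (fun s => !((taken ++ [m]).contains s)) =
          (stables.filter (fun s => !(taken.contains s))).erase m := by
        rw [pvFilterSnocEq, List.Nodup.erase_eq_filter hndF]
        rfl
      have hmemlen : ((stables.filter (fun s => !(taken.contains s))).erase m).length ≤ N := by
        rw [List.length_erase_of_mem hmF]
        have : 0 < (stables.filter (fun s => !(taken.contains s))).length :=
          List.length_pos_of_mem hmF
        omega
      have hIH := ih (taken ++ [m]) (total + |m - ri|)
        (by rw [List.nodup_append]
            refine ⟨hnt, by simp, ?_⟩
            intro a ha b hb
            have hbm : b = m := by simpa using hb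
            subst hbm
            intro hab
            exact hmT (hab ▸ ha))
        (by intro y hy
            rcases List.mem_append.mp hy with h | h
            · exact hts h
            · have hym : y = m := by simpa using h
              rw [hym]; exact hmS)
        (by rw [hF']; exact hmemlen)
      simp only [List.length_append, List.length_cons, List.length_nil, Nat.zero_add,
        Nat.cast_add, Nat.cast_one, hF'] at hIH
      rw [hadd, hIH]
      -- B side: pull one step out of the fold
      have hri' : ri = reindeer[taken.length]'(by omega) := by
        rw [hri]
        rw [PySem.List.pyGetD_natCast]
        exact List.getD_eq_getElem reindeer 0 (by omega)
      have hdrop : List.drop taken.length (reindeer.take stables.length) =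
          ri :: List.drop (taken.length + 1) (reindeer.take stables.length) := by
        rw [List.drop_eq_getElem_cons (by rw [List.length_take]; omega)]
        congr 1
        rw [hri']
        exact List.getElem_take
      have hpick : bPick ri (x :: t) = m := by
        have h1 := gmin_min? ri x t
        rw [← hA, hm] at h1
        have h2 : gmin ri x t = m := Option.some_inj.mp h1.symm
        simp only [bPick, PySem.List.slice_from_one, List.tail_cons,
          PySem.List.pyGetD_zero_cons]
        exact h2
      rw [hdrop, List.foldl_cons]
      simp only [hpick, pvRemoveGetD (x :: t) m (hA ▸ hmF)]
      rw [hA]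

-- ===== VERDICT (by name: the statement is the Claim_ definition above) =====
theorem min_moves_to_stables_spec : Claim_equal_min_moves_to_stables := by
  intro reindeer stables _hdom hpre
  obtain ⟨hnd, hlen⟩ := hpre
  unfold Spec_min_moves_to_stables min_moves_to_stables min_moves_to_stables_alt
  rw [show (PySem.Set.empty : PySem.Set Int) = [] from rfl]
  have h0 : stables.filter (fun s => !((List.nil (α := Int)).contains s)) = stables := by
    simp
  have hmain := main_loop reindeer stables hnd hlen stables.length [] 0
    (by simp) (by simp)
    (by rw [h0])
  rw [h0] at hmain
  simp only [List.length_nil, Nat.cast_zero, List.drop_zero] at hmain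
  rw [hmain, PySem.List.len_eq, PySem.List.slice_to_natCast]
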